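-- pv_equiv track=rewrite | github.com/changediyasunny/Challenges | repeat_char.py | repeat_char
-- ===== SOURCE A (Python) =====
-- from collections import defaultdict
--
-- def repeat_char(string):
--
-- 	my_dict = defaultdict(lambda:0)
--
-- 	counter = 0
--
-- 	for i in string:
--
-- 		if my_dict[i] == 1:
--
-- 			return i
-- 		else:
-- 			my_dict[i] += 1
-- ===== SOURCE B (Python) =====
-- def repeat_char(string):
--     best = None
--     for c in set(string):
--         i = string.find(c)
--         j = string.find(c, i + 1)
--         if j != -1 and (best is None or j < best[0]):
--             best = (j, c)
--     if best is not None: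
--         return best[1]
-- ===== Notes on version B (the rewrite author's own statement) =====
-- stated objective: alternative
-- what changed: Instead of A's single left-to-right scan with a maintained counter dict, B iterates over the distinct characters of the string, locates each one's second occurrence with two string.find calls, and returns the character whose second occurrence has the minimal index.
import Mathlib
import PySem

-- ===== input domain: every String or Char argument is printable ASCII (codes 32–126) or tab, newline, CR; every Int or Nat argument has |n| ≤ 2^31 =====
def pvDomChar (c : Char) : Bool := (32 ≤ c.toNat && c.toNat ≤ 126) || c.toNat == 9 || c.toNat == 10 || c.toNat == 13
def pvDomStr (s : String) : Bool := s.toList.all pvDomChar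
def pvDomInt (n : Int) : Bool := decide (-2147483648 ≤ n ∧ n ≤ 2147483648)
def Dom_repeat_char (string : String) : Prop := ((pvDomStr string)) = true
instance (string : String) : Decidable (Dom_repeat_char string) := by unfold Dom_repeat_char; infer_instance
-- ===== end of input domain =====

-- B replaces A's left-to-right scan with a maintained counter dict by a staged
-- computation over the distinct characters: for each character, find its second
-- occurrence via two string.find calls, and keep the candidate with the minimal
-- second-occurrence index (idiomatic/alternative rewrite, same result).


-- ===== PORT A =====
-- loop over the characters, keeping the defaultdict(lambda:0) counter;
-- `my_dict[i]` is read as getD d c 0 (the defaultdict's insert-on-read of the default 0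
-- is value-equivalent: in the else branch the key is overwritten with v+1 anyway,
-- and in the return branch the dict is discarded)
def repeatCharLoopA (l : List Char) (d : PySem.Dict Char Int) : Option String :=
  match l with
  | [] => none
  | c :: rest =>
    let v := d.getD c 0
    if v == 1 then some (String.ofList [c])
    else repeatCharLoopA rest (d.insert c (v + 1))

def repeat_char (string : String) : Option String :=
  repeatCharLoopA string.toList PySem.Dict.empty

-- ===== PORT B =====
-- for c in set(string): i = string.find(c); j = string.find(c, i+1);
--   if j != -1 and (best is None or j < best[0]): best = (j, c)
def repeatCharStep (string : String) (best : Option (Int × Char)) (c : Char) : Option (Int × Char) :=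
  let i := PySem.Str.find string (String.ofList [c])
  let j := PySem.Str.findFrom string (String.ofList [c]) (i + 1)
  if j != -1 && (match best with | none => true | some (bj, _) => decide (j < bj)) then
    some (j, c)
  else best

def repeat_char_alt (string : String) : Option String :=
  match (PySem.Set.ofList string.toList).foldl (repeatCharStep string) none with
  | some (_, c) => some (String.ofList [c])
  | none => none

-- ===== PRECONDITION & SPEC =====
def Spec_repeat_char (string : String) (out : Option String) : Prop := out = repeat_char_alt string
instance (string : String) (out : Option String) : Decidable (Spec_repeat_char string out) := by unfold Spec_repeat_char; infer_instance

-- ===== CLAIM (what is proved, stated in full; the proofs are below) =====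
def Claim_equal_repeat_char : Prop := ∀ (string : String), Dom_repeat_char string → Spec_repeat_char string (repeat_char string)

-- ===== LEMMAS AND PROOFS =====

-- k is a "duplicate position" of s: the character at k already occurred before k
def pvDup (s : List Char) (k : Nat) : Prop := ∃ h : k < s.length, s[k] ∈ s.take k

-- first duplicate position of s at or after i, with its character
def fdAux (s : List Char) (i : Nat) : Option (Nat × Char) :=
  if h : i < s.length then
    if s[i] ∈ s.take i then some (i, s[i]) else fdAux s (i + 1)
  else none
termination_by s.length - i

theorem fdAux_some (s : List Char) :
    ∀ (i : Nat) (j : Nat) (c : Char), fdAux s i = some (j, c) →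
      i ≤ j ∧ ∃ hj : j < s.length, s[j] = c ∧ c ∈ s.take j ∧
        ∀ k, i ≤ k → k < j → ¬ pvDup s k := by
  intro i
  induction i using fdAux.induct s with
  | case1 x hx hmem =>
    intro j c hfd
    rw [fdAux] at hfd
    simp [hx, hmem] at hfd
    obtain ⟨hj, hc⟩ := hfd
    subst hj
    exact ⟨le_refl _, hx, hc, by rw [← hc]; exact hmem, fun k hk1 hk2 => by omega⟩
  | case2 x hx hmem ih =>
    intro j c hfd
    rw [fdAux] at hfd
    simp [hx, hmem] at hfd
    obtain ⟨h1, hj, h2, h3, h4⟩ := ih j c hfd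
    refine ⟨by omega, hj, h2, h3, fun k hk1 hk2 => ?_⟩
    rcases Nat.eq_or_lt_of_le hk1 with h | h
    · intro hdup
      obtain ⟨hlt, hm⟩ := hdup
      subst h
      exact hmem hm
    · exact h4 k h hk2
  | case3 x hx =>
    intro j c hfd
    rw [fdAux] at hfd
    simp [hx] at hfd

theorem fdAux_none (s : List Char) :
    ∀ (i : Nat), fdAux s i = none → ∀ k, i ≤ k → ¬ pvDup s k := by
  intro i
  induction i using fdAux.induct s with
  | case1 x hx hmem =>
    intro hfd
    rw [fdAux] at hfd
    simp [hx, hmem] at hfd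
  | case2 x hx hmem ih =>
    intro hfd k hk
    rw [fdAux] at hfd
    simp [hx, hmem] at hfd
    rcases Nat.eq_or_lt_of_le hk with h | h
    · intro hdup
      obtain ⟨hlt, hm⟩ := hdup
      subst h
      exact hmem hm
    · exact ih hfd k h
  | case3 x hx =>
    intro _ k hk hdup
    obtain ⟨hlt, _⟩ := hdup
    omega

-- ===== A-side: the counter loop finds the first duplicate position =====
theorem loopA_eq_fdAux (s : List Char) :
    ∀ (t : List Char) (i : Nat) (d : PySem.Dict Char Int),
      t = s.drop i →
      (∀ c : Char, d.getD c 0 = if c ∈ s.take i then 1 else 0) →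
      repeatCharLoopA t d = (fdAux s i).map (fun p => String.ofList [p.2]) := by
  intro t
  induction t with
  | nil =>
    intro i d ht _
    have hlen : s.length ≤ i := by
      by_contra h
      have hlt : i < s.length := by omega
      have := s.drop_eq_getElem_cons hlt
      rw [← ht] at this
      simp at this
      omega
    rw [fdAux]
    simp [repeatCharLoopA, Nat.not_lt.mpr hlen]
  | cons c rest ih =>
    intro i d ht hd
    have hi : i < s.length := by
      by_contra h
      rw [List.drop_eq_nil_of_le (by omega)] at ht
      simp at ht
    have hcons := s.drop_eq_getElem_cons hi
    rw [← ht] at hcons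
    have hc : s[i] = c := ((List.cons.inj hcons).1).symm
    have hrest : rest = s.drop (i + 1) := (List.cons.inj hcons).2
    rw [fdAux]
    simp only [hi, dif_pos, hc]
    by_cases hmem : c ∈ s.take i
    · have hv1 : d.getD c 0 = 1 := by rw [hd c]; exact if_pos hmem
      simp [repeatCharLoopA, hv1, hmem]
    · have hv : d.getD c 0 = 0 := by rw [hd c]; simp [hmem]
      have hone : ((0 : Int) == 1) = false := by decide
      simp only [repeatCharLoopA, hv, hone, Bool.false_eq_true, if_false, hmem, if_false]
      rw [ih (i + 1) _ hrest]
      intro c'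
      rw [PySem.Dict.getD_insert]
      have htake : s.take (i + 1) = s.take i ++ [c] := by
        rw [List.take_add_one]
        simp [List.getElem?_eq_getElem hi, hc]
      rw [htake]
      by_cases hcc : c' = c
      · subst hcc; simp
      · simp [hcc, hd c']

theorem repeat_char_eq (string : String) :
    repeat_char string = (fdAux string.toList 0).map (fun p => String.ofList [p.2]) := by
  apply loopA_eq_fdAux string.toList string.toList 0
  · simp
  · intro c
    simp [PySem.Dict.getD_empty]

-- ===== B-side =====
-- the candidate index stepB computes for a character c (proof-side mirror)
def gB (string : String) (c : Char) : Option Int :=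
  let i := PySem.Str.find string (String.ofList [c])
  let j := PySem.Str.findFrom string (String.ofList [c]) (i + 1)
  if j = -1 then none else some j

def min2 (b : Option (Int × Char)) (p : Int × Char) : Option (Int × Char) :=
  match b with
  | none => some p
  | some q => if p.1 < q.1 then some p else some q

theorem step_eq_min2 (string : String) (best : Option (Int × Char)) (c : Char) :
    repeatCharStep string best c =
      match gB string c with
      | none => best
      | some j => min2 best (j, c) := by
  simp only [repeatCharStep, gB, min2, PySem.Str.find_eq, PySem.Str.findFrom_eq,
    String.toList_ofList]
  generalize PySem.Chars.findFrom string.toList [c] (PySem.Chars.find string.toList [c] + 1) = j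
  by_cases h : j = -1
  · simp [h]
  · cases best with
    | none => simp [h, bne]
    | some q =>
      obtain ⟨bj, bc⟩ := q
      by_cases hlt : j < bj <;> simp [h, bne, hlt]

def cands (string : String) (D : List Char) : List (Int × Char) :=
  D.filterMap (fun c => (gB string c).map (fun j => (j, c)))

theorem foldl_step_eq_foldl_min2 (string : String) :
    ∀ (D : List Char) (b : Option (Int × Char)),
      D.foldl (repeatCharStep string) b = (cands string D).foldl min2 b := by
  intro D
  induction D with
  | nil => intro b; rfl
  | cons c D ih =>
    intro b
    simp only [List.foldl_cons, cands, List.filterMap_cons]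
    cases hg : gB string c with
    | none => rw [step_eq_min2, hg]; exact ih b
    | some j => rw [step_eq_min2, hg]; simp only [Option.map_some]; rw [List.foldl_cons]; exact ih _

theorem foldl_min2_some :
    ∀ (L : List (Int × Char)) (q : Int × Char),
      ∃ p, L.foldl min2 (some q) = some p ∧ (p = q ∨ p ∈ L) ∧ p.1 ≤ q.1 ∧
        ∀ r ∈ L, p.1 ≤ r.1 := by
  intro L
  induction L with
  | nil => intro q; exact ⟨q, rfl, Or.inl rfl, le_refl _, by simp⟩
  | cons a t ih =>
    intro q
    simp only [List.foldl_cons, min2]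
    by_cases h : a.1 < q.1
    · obtain ⟨p, h1, h2, h3, h4⟩ := ih a
      rw [if_pos h]
      refine ⟨p, h1, ?_, by omega, ?_⟩
      · rcases h2 with h2 | h2
        · exact Or.inr (by simp [h2])
        · exact Or.inr (by simp [h2])
      · intro r hr
        rcases List.mem_cons.mp hr with h5 | h5
        · subst h5; omega
        · exact h4 r h5
    · obtain ⟨p, h1, h2, h3, h4⟩ := ih q
      rw [if_neg h]
      refine ⟨p, h1, ?_, h3, ?_⟩
      · rcases h2 with h2 | h2
        · exact Or.inl h2
        · exact Or.inr (by simp [h2])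
      · intro r hr
        rcases List.mem_cons.mp hr with h5 | h5
        · subst h5; omega
        · exact h4 r h5

theorem singleton_prefix_iff (c : Char) (l : List Char) : [c] <+: l ↔ l.head? = some c := by
  cases l with
  | nil => simp
  | cons a t => simp [List.cons_prefix_cons, eq_comm]

theorem prefix_drop_iff (s : List Char) (c : Char) (k : Nat) :
    [c] <+: s.drop k ↔ ∃ h : k < s.length, s[k] = c := by
  rw [singleton_prefix_iff, List.head?_drop, List.getElem?_eq_some_iff]

theorem singleton_infix_iff (c : Char) (l : List Char) : [c] <:+: l ↔ c ∈ l := by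
  constructor
  · intro h
    exact (List.singleton_sublist).mp h.sublist
  · intro h
    obtain ⟨u, v, rfl⟩ := List.append_of_mem h
    exact ⟨u, v, by simp⟩

theorem mem_take_of_getElem (s : List Char) (m n : Nat) (hmn : m < n) (hm : m < s.length) :
    s[m] ∈ s.take n := by
  have h1 : m < (s.take n).length := by simp [List.length_take]; omega
  have h2 := List.getElem_mem h1
  rwa [List.getElem_take] at h2

theorem exists_getElem_of_mem_take (s : List Char) (c : Char) (n : Nat) (h : c ∈ s.take n) :
    ∃ m, m < n ∧ ∃ hm : m < s.length, s[m] = c := by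
  obtain ⟨m, hm, he⟩ := List.mem_iff_getElem.mp h
  rw [List.getElem_take] at he
  simp [List.length_take] at hm
  exact ⟨m, hm.1, hm.2, he⟩

theorem mem_drop_iff (s : List Char) (c : Char) (k : Nat) :
    c ∈ s.drop k ↔ ∃ m, k ≤ m ∧ ∃ hm : m < s.length, s[m] = c := by
  constructor
  · intro h
    obtain ⟨t, ht, he⟩ := List.mem_iff_getElem.mp h
    rw [List.getElem_drop] at he
    simp [List.length_drop] at ht
    exact ⟨k + t, by omega, by omega, he⟩
  · rintro ⟨m, hkm, hm, he⟩
    have h1 : m - k < (s.drop k).length := by simp [List.length_drop]; omega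
    have h2 := List.getElem_mem h1
    rw [List.getElem_drop] at h2
    have h3 : k + (m - k) = m := by omega
    simp only [h3, he] at h2
    exact h2

theorem findFrom_singleton_neg_iff (s : List Char) (c : Char) (k : Nat) (hk : k ≤ s.length) :
    PySem.Chars.findFrom s [c] (k : Int) = -1 ↔
      ∀ m, k ≤ m → ∀ hm : m < s.length, s[m] ≠ c := by
  rw [PySem.Chars.findFrom_natCast_eq_neg_one_iff s [c] k hk, singleton_infix_iff, mem_drop_iff]
  constructor
  · intro h m hkm hm he
    exact h ⟨m, hkm, hm, he⟩
  · rintro h ⟨m, hkm, hm, he⟩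
    exact h m hkm hm he

theorem findFrom_singleton_spec (s : List Char) (c : Char) (k : Nat) (hk : k ≤ s.length)
    (hne : PySem.Chars.findFrom s [c] (k : Int) ≠ -1) :
    ∃ j : Nat, PySem.Chars.findFrom s [c] (k : Int) = (j : Int) ∧ k ≤ j ∧
      ∃ hj : j < s.length, s[j] = c ∧ ∀ m, k ≤ m → m < j → ∀ hm : m < s.length, s[m] ≠ c := by
  obtain ⟨h1, h2, h3⟩ := PySem.Chars.findFrom_natCast_spec s [c] k hk hne
  set jz := PySem.Chars.findFrom s [c] (k : Int) with hjz
  have hz : 0 ≤ jz := le_trans (by positivity) h1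
  obtain ⟨hlen, hc⟩ := (prefix_drop_iff s c jz.toNat).mp h2
  refine ⟨jz.toNat, by omega, by omega, hlen, hc, ?_⟩
  intro m hkm hmj hm he
  exact h3 m hkm hmj ((prefix_drop_iff s c m).mpr ⟨hm, he⟩)

theorem find_singleton_spec (s : List Char) (c : Char) (hc : c ∈ s) :
    ∃ i : Nat, PySem.Chars.find s [c] = (i : Int) ∧
      ∃ hi : i < s.length, s[i] = c ∧ ∀ m, m < i → ∀ hm : m < s.length, s[m] ≠ c := by
  have h0 : ((0 : Nat) : Int) = 0 := rfl
  have hne : PySem.Chars.findFrom s [c] ((0 : Nat) : Int) ≠ -1 := by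
    rw [Ne, findFrom_singleton_neg_iff s c 0 (Nat.zero_le _)]
    obtain ⟨m, hm, he⟩ := List.mem_iff_getElem.mp hc
    intro hall
    exact hall m (Nat.zero_le _) hm he
  obtain ⟨i, he, _, hi, hcc, hmin⟩ := findFrom_singleton_spec s c 0 (Nat.zero_le _) hne
  rw [h0, PySem.Chars.findFrom_zero] at he
  exact ⟨i, he, hi, hcc, fun m hmi hm => hmin m (Nat.zero_le _) hmi hm⟩

-- G1: any candidate is a duplicate position carrying its own character
theorem gB_some (string : String) (c : Char) (j : Int) (h : gB string c = some j) :
    ∃ jn : Nat, j = (jn : Int) ∧ ∃ hj : jn < string.toList.length,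
      string.toList[jn] = c ∧ c ∈ string.toList.take jn := by
  unfold gB at h
  simp only [PySem.Str.find_eq, PySem.Str.findFrom_eq, String.toList_ofList] at h
  by_cases hne : PySem.Chars.findFrom string.toList [c]
      (PySem.Chars.find string.toList [c] + 1) = -1
  · simp [hne] at h
  · simp only [hne, if_false] at h
    by_cases hcm : c ∈ string.toList
    · obtain ⟨i, hieq, hilen, hic, _⟩ := find_singleton_spec string.toList c hcm
      rw [hieq] at hne h
      have hcast : ((i : Int) + 1) = ((i + 1 : Nat) : Int) := by push_cast; ring
      rw [hcast] at hne h
      obtain ⟨jn, hjeq, hkle, hjlen, hjc, _⟩ :=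
        findFrom_singleton_spec string.toList c (i + 1) (by omega) hne
      rw [hjeq] at h
      refine ⟨jn, (Option.some.inj h).symm, hjlen, hjc, ?_⟩
      have := mem_take_of_getElem string.toList i jn (by omega) hilen
      rwa [hic] at this
    · exfalso
      have hf : PySem.Chars.find string.toList [c] = -1 := by
        rw [← PySem.Chars.findFrom_zero]
        have h0 : ((0 : Nat) : Int) = 0 := rfl
        rw [← h0, PySem.Chars.findFrom_natCast_eq_neg_one_iff string.toList [c] 0 (Nat.zero_le _),
          List.drop_zero, singleton_infix_iff]
        exact hcm
      rw [hf] at hne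
      have hcast : (-1 + 1 : Int) = ((0 : Nat) : Int) := by norm_num
      rw [hcast] at hne
      obtain ⟨jn, _, _, hjlen, hjc, _⟩ :=
        findFrom_singleton_spec string.toList c 0 (Nat.zero_le _) hne
      exact hcm (by rw [← hjc]; exact List.getElem_mem hjlen)

-- G2: the overall first duplicate position is the candidate of its character
theorem gB_first (string : String) (j : Nat) (c : Char)
    (hj : j < string.toList.length) (hc : string.toList[j] = c)
    (hmem : c ∈ string.toList.take j)
    (hmin : ∀ k, k < j → ¬ pvDup string.toList k) :
    gB string c = some (j : Int) := by
  unfold gB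
  simp only [PySem.Str.find_eq, PySem.Str.findFrom_eq, String.toList_ofList]
  have hcm : c ∈ string.toList := by rw [← hc]; exact List.getElem_mem hj
  obtain ⟨i, hieq, hilen, hic, himin⟩ := find_singleton_spec string.toList c hcm
  obtain ⟨m, hmj, hm, hmc⟩ := exists_getElem_of_mem_take string.toList c j hmem
  have him : i ≤ m := by
    by_contra hcon
    exact himin m (by omega) hm hmc
  have hij : i < j := by omega
  rw [hieq]
  have hcast : ((i : Int) + 1) = ((i + 1 : Nat) : Int) := by push_cast; ring
  rw [hcast]
  have hne : PySem.Chars.findFrom string.toList [c] ((i + 1 : Nat) : Int) ≠ -1 := by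
    rw [Ne, findFrom_singleton_neg_iff string.toList c (i + 1) (by omega)]
    intro hall
    exact hall j (by omega) hj hc
  obtain ⟨jn, hjeq, hkle, hjlen, hjc, hjmin⟩ :=
    findFrom_singleton_spec string.toList c (i + 1) (by omega) hne
  have hjnj : jn = j := by
    have h1 : jn ≤ j := by
      by_contra hcon
      exact hjmin j (by omega) (by omega) hj hc
    have h2 : j ≤ jn := by
      by_contra hcon
      refine hmin jn (by omega) ⟨hjlen, ?_⟩
      rw [hjc]
      have := mem_take_of_getElem string.toList i jn (by omega) hilen
      rwa [hic] at this
    omega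
  rw [hjeq, hjnj]
  have : ((j : Int)) ≠ -1 := by omega
  simp [this]

theorem alt_eq (string : String) :
    repeat_char_alt string = (fdAux string.toList 0).map (fun p => String.ofList [p.2]) := by
  unfold repeat_char_alt
  rw [foldl_step_eq_foldl_min2]
  cases hfd : fdAux string.toList 0 with
  | none =>
    have hnone : ∀ c, gB string c = none := by
      intro c
      cases hg : gB string c with
      | none => rfl
      | some jz =>
        obtain ⟨jn, _, hjl, hjc, hjm⟩ := gB_some string c jz hg
        exact absurd ⟨hjl, by rw [hjc]; exact hjm⟩
          (fdAux_none string.toList 0 hfd jn (Nat.zero_le _))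
    have hcnil : cands string (PySem.Set.ofList string.toList) = [] := by
      simp [cands, hnone]
    rw [hcnil]
    rfl
  | some p =>
    obtain ⟨j, c⟩ := p
    obtain ⟨_, hj, hc, hmem, hmin⟩ := fdAux_some string.toList 0 j c hfd
    have hgc : gB string c = some (j : Int) :=
      gB_first string j c hj hc hmem (fun k hk => hmin k (Nat.zero_le _) hk)
    have hin : ((j : Int), c) ∈ cands string (PySem.Set.ofList string.toList) := by
      apply List.mem_filterMap.mpr
      refine ⟨c, ?_, by rw [hgc]; rfl⟩
      rw [PySem.Set.mem_ofList]
      rw [← hc]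
      exact List.getElem_mem hj
    obtain ⟨p0, rest, hC⟩ := List.exists_cons_of_ne_nil (List.ne_nil_of_mem hin)
    rw [hC, List.foldl_cons]
    have h0 : min2 none p0 = some p0 := rfl
    obtain ⟨p, hp1, hp2, hp3, hp4⟩ := foldl_min2_some rest p0
    rw [h0, hp1]
    have hpmem : p ∈ cands string (PySem.Set.ofList string.toList) := by
      rw [hC]
      rcases hp2 with h | h
      · exact h ▸ List.mem_cons_self
      · exact List.mem_cons_of_mem _ h
    have hple : p.1 ≤ (j : Int) := by
      rw [hC] at hin
      rcases List.mem_cons.mp hin with h | h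
      · rw [← h] at hp3; simpa using hp3
      · exact hp4 _ h
    obtain ⟨pj, pc⟩ := p
    obtain ⟨c2, _, hgc2⟩ := List.mem_filterMap.mp hpmem
    cases hg2 : gB string c2 with
    | none => rw [hg2] at hgc2; simp at hgc2
    | some jz =>
      rw [hg2] at hgc2
      simp only [Option.map_some, Option.some.injEq, Prod.mk.injEq] at hgc2
      obtain ⟨hjz, hc2⟩ := hgc2
      obtain ⟨jn, hjneq, hjnl, hjnc, hjnm⟩ := gB_some string c2 jz hg2
      have hjge : j ≤ jn := by
        by_contra hcon
        exact hmin jn (Nat.zero_le _) (by omega) ⟨hjnl, by rw [hjnc]; exact hjnm⟩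
      have hjeqn : jn = j := by
        have h5 : jz = (jn : Int) := hjneq
        have h6 : pj ≤ (j : Int) := hple
        have h7 : jz = pj := hjz
        omega
      have hcc : c2 = c := by
        have h7 := hjnc
        simp only [hjeqn] at h7
        rw [← hc, ← h7]
      simp only [Option.map_some]
      rw [← hc2, hcc]

-- ===== VERDICT (by name: the statement is the Claim_ definition above) =====
theorem repeat_char_spec : Claim_equal_repeat_char := by
  intro string _
  unfold Spec_repeat_char
  rw [repeat_char_eq, alt_eq]
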